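-- pv_equiv track=rewrite | github.com/jtambe/Python | MaxSubarrayXORInArray.py | MaxSubarrayXOR
-- ===== SOURCE A (Python) =====
-- def MaxSubarrayXOR(arr):
--
--     ans = float("-infinity")
--
--     for i in range(len(arr)):
--         curr_XOR = 0
--
--         for j in range(i, len(arr)):
--             curr_XOR = curr_XOR ^ arr[j]
--             ans = max(ans, curr_XOR)
--
--     return ans
-- ===== SOURCE B (Python) =====
-- def MaxSubarrayXOR(arr):
--     # Binary trie over 33-bit two's-complement representations of prefix XORs:
--     # one O(33) query per element instead of A's inner rescan.
--     MOD = 1 << 33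
--     BIAS = 1 << 32
--     root = [None, None]
--
--     def insert(s):
--         node = root
--         for i in range(32, -1, -1):
--             b = (s >> i) & 1
--             if node[b] is None:
--                 node[b] = [None, None]
--             node = node[b]
--
--     def query(q):
--         node = root
--         r = 0
--         for i in range(32, -1, -1):
--             b = (q >> i) & 1
--             if node[1 - b] is not None:
--                 r |= 1 << i
--                 node = node[1 - b]
--             else:
--                 node = node[b]
--         return r
--
--     insert(0)
--     ans = None
--     pref = 0
--     for x in arr:
--         pref ^= x
--         r = query((pref % MOD) ^ BIAS)  # max biased XOR against stored prefixes
--         u = r ^ BIAS                    # two's-complement rep of best subarray XOR ending here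
--         v = u if u < BIAS else u - MOD
--         ans = v if ans is None else max(ans, v)
--         insert(pref % MOD)
--     return ans
-- ===== Notes on version B (the rewrite author's own statement) =====
-- stated objective: faster
-- what changed: Replaces A's quadratic scan over all start positions by a single pass that keeps the two's-complement representations of all prefix XORs in a binary trie and answers 'best XOR against any earlier prefix' with one 33-bit greedy descent per element.
-- outside the precondition, e.g. on MaxSubarrayXOR([]): A returns -inf, B returns None
import Mathlib
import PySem

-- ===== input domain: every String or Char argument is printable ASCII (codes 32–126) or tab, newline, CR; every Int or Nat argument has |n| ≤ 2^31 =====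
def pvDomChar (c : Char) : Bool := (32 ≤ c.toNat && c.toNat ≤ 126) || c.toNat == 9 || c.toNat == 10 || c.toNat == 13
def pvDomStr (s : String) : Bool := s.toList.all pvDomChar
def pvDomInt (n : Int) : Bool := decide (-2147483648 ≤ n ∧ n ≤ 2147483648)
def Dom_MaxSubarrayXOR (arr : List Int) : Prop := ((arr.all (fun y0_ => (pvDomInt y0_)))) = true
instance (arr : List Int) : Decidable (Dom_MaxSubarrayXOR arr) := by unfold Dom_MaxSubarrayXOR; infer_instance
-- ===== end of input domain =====

-- B replaces A's quadratic double loop by a single pass over the array that stores the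
-- two's-complement representations of all prefix XORs in a binary trie and finds the best
-- XOR partner of each new prefix with one 33-bit greedy descent (measurably faster).
-- Pre_ excludes only the empty list, on which A returns float('-infinity'), not an int.


-- ===== PORT A =====
-- float('-infinity') is modeled as `none` (max(none, c) = c); it survives to the end only
-- for arr = [], which Pre_ excludes, where `.getD 0` supplies a default.
def MaxSubarrayXOR (arr : List Int) : Int :=
  let ans : Option Int :=
    (PySem.List.pyRange 0 (PySem.List.len arr) 1).foldl (fun ans i =>
      ((PySem.List.pyRange i (PySem.List.len arr) 1).foldl
        (fun (st : Int × Option Int) j =>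
          let c := PySem.Int.bxor st.1 (PySem.List.pyGetD arr j 0)   -- arr[j], j always in range
          (c, some (match st.2 with | none => c | some a => max a c)))
        (0, ans)).2) none
  ans.getD 0

-- ===== PORT B =====
-- binary trie over 33-bit keys; `nil` = absent child (Python's None), `node` = a ['l','r'] cell
inductive PvTrie : Type
  | nil : PvTrie
  | node : PvTrie → PvTrie → PvTrie
deriving DecidableEq, Repr

def pvChild (b : Bool) : PvTrie → PvTrie
  | .nil => .nil
  | .node l r => if b then r else l

-- insert(s): walk bits 32..0, creating missing cells (w = number of bits still to process)
def pvInsert : Nat → Nat → PvTrie → PvTrie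
  | 0, _, _ => .node .nil .nil
  | w+1, s, t =>
    if s.testBit w then .node (pvChild false t) (pvInsert w s (pvChild true t))
    else .node (pvInsert w s (pvChild false t)) (pvChild true t)

-- query(q): walk bits 32..0, preferring the child with the opposite bit
def pvQuery : Nat → Nat → PvTrie → Nat
  | 0, _, _ => 0
  | w+1, q, t =>
    let b := q.testBit w
    if pvChild (!b) t ≠ .nil then 2^w + pvQuery w q (pvChild (!b) t)
    else pvQuery w q (pvChild b t)

def MaxSubarrayXOR_alt (arr : List Int) : Int :=
  let st := arr.foldl (fun (st : PvTrie × Int × Option Int) x =>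
      let pref := PySem.Int.bxor st.2.1 x
      let rep : Nat := (PySem.Int.mod pref 8589934592).toNat       -- pref % MOD
      let r := pvQuery 33 (rep ^^^ 4294967296) st.1                -- query((pref % MOD) ^ BIAS)
      let u := r ^^^ 4294967296
      let v : Int := if u < 4294967296 then (u : Int) else (u : Int) - 8589934592
      let ans : Option Int := some (match st.2.2 with | none => v | some a => max a v)
      (pvInsert 33 rep st.1, pref, ans))
    (pvInsert 33 0 PvTrie.nil, 0, none)
  st.2.2.getD 0   -- ans is None only for arr = [], which Pre_ excludes

-- ===== PRECONDITION & SPEC =====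
-- Pre_ excludes only arr = [], on which A returns float('-infinity') — a float, not an int.
def Pre_MaxSubarrayXOR (arr : List Int) : Prop := arr ≠ []
instance (arr : List Int) : Decidable (Pre_MaxSubarrayXOR arr) := by unfold Pre_MaxSubarrayXOR; infer_instance
def pvWitness_MaxSubarrayXOR : List Int := [9, 8, 5, 2]

def Spec_MaxSubarrayXOR (arr : List Int) (out : Int) : Prop := out = MaxSubarrayXOR_alt arr
instance (arr : List Int) (out : Int) : Decidable (Spec_MaxSubarrayXOR arr out) := by unfold Spec_MaxSubarrayXOR; infer_instance

-- ===== CLAIM (what is proved, stated in full; the proofs are below) =====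
def Claim_equal_MaxSubarrayXOR : Prop := ∀ (arr : List Int), Dom_MaxSubarrayXOR arr → Pre_MaxSubarrayXOR arr → Spec_MaxSubarrayXOR arr (MaxSubarrayXOR arr)

-- ===== LEMMAS AND PROOFS =====

-- XOR of a list, prefix XORs, and the common candidate set: both programs maximise
-- 'bxor (prefix i) (prefix j)' over 0 ≤ j < i ≤ n.
def pvX (l : List Int) : Int := l.foldl PySem.Int.bxor 0
def pvCand (arr : List Int) (v : Int) : Prop :=
  ∃ i j : Nat, j < i ∧ i ≤ arr.length ∧ v = PySem.Int.bxor (pvX (arr.take i)) (pvX (arr.take j))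
def pvIsMax (arr : List Int) (m : Int) : Prop := pvCand arr m ∧ ∀ v, pvCand arr v → v ≤ m

-- running maximum with a 'None = -inf' accumulator (the shape both ports use)
def pvMaxO (a : Option Int) (l : List Int) : Option Int :=
  l.foldl (fun a c => some (match a with | none => c | some a => max a c)) a

-- ---- generic xor algebra ----
theorem pv_bxor_eq_xor (a b : Int) : PySem.Int.bxor a b = Int.xor a b := by
  unfold PySem.Int.bxor Int.xor
  rcases a with m | m <;> rcases b with n | n <;> simp [Int.toNat] <;> omega

theorem pv_bxor_assoc (a b c : Int) :
    PySem.Int.bxor (PySem.Int.bxor a b) c = PySem.Int.bxor a (PySem.Int.bxor b c) := by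
  simp only [pv_bxor_eq_xor]
  rcases a with m | m <;> rcases b with n | n <;> rcases c with p | p <;>
    simp [Int.xor, Nat.xor_assoc]

theorem pv_bxor_cancel (a b : Int) : PySem.Int.bxor a (PySem.Int.bxor a b) = b := by
  rw [← pv_bxor_assoc, PySem.Int.bxor_self, PySem.Int.bxor_comm, PySem.Int.bxor_zero]

theorem pv_zero_bxor (b : Int) : PySem.Int.bxor 0 b = b := by
  rw [PySem.Int.bxor_comm, PySem.Int.bxor_zero]

theorem pv_foldl_bxor_seed (l : List Int) (c : Int) :
    l.foldl PySem.Int.bxor c = PySem.Int.bxor c (pvX l) := by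
  induction l generalizing c with
  | nil => simp [pvX, PySem.Int.bxor_zero]
  | cons x xs ih =>
    show xs.foldl PySem.Int.bxor (PySem.Int.bxor c x) = _
    rw [ih]
    have : pvX (x :: xs) = PySem.Int.bxor x (pvX xs) := by
      show xs.foldl PySem.Int.bxor (PySem.Int.bxor 0 x) = _
      rw [ih, pv_zero_bxor]
    rw [this, pv_bxor_assoc]

theorem pvX_append (l₁ l₂ : List Int) : pvX (l₁ ++ l₂) = PySem.Int.bxor (pvX l₁) (pvX l₂) := by
  unfold pvX
  rw [List.foldl_append, pv_foldl_bxor_seed]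
  rfl

-- ---- bounds ----
def pvInRange (x : Int) : Prop := -4294967296 ≤ x ∧ x < 4294967296

theorem pv_bxor_range {a b : Int} (ha : pvInRange a) (hb : pvInRange b) :
    pvInRange (PySem.Int.bxor a b) := by
  obtain ⟨ha0, ha1⟩ := ha
  obtain ⟨hb0, hb1⟩ := hb
  have h32 : (2:Nat)^32 = 4294967296 := by norm_num
  unfold PySem.Int.bxor pvInRange
  split_ifs with h1 h2 h3 <;>
  · first
    | (have := Nat.xor_lt_two_pow (x := a.toNat) (y := b.toNat) (n := 32)
       rw [h32] at this; omega)
    | (have := Nat.xor_lt_two_pow (x := a.toNat) (y := (-b-1).toNat) (n := 32)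
       rw [h32] at this; omega)
    | (have := Nat.xor_lt_two_pow (x := (-a-1).toNat) (y := b.toNat) (n := 32)
       rw [h32] at this; omega)
    | (have := Nat.xor_lt_two_pow (x := (-a-1).toNat) (y := (-b-1).toNat) (n := 32)
       rw [h32] at this; omega)

theorem pvX_cons (x : Int) (l : List Int) : pvX (x :: l) = PySem.Int.bxor x (pvX l) := by
  show l.foldl PySem.Int.bxor (PySem.Int.bxor 0 x) = _
  rw [pv_foldl_bxor_seed, pv_zero_bxor]

theorem pvX_range {l : List Int} (h : ∀ x ∈ l, pvInRange x) : pvInRange (pvX l) := by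
  induction l with
  | nil => refine ⟨?_, ?_⟩ <;> norm_num [pvX]
  | cons x xs ih =>
    rw [pvX_cons]
    exact pv_bxor_range (h x (by simp)) (ih fun y hy => h y (by simp [hy]))

-- ---- Nat bit-fiddling helpers ----
theorem pv_two_pow_mul_xor (k a y : Nat) (hy : y < 2^k) : (2^k * a) ^^^ y = 2^k * a + y := by
  induction k generalizing a y with
  | zero => interval_cases y; simp
  | succ k ih =>
    have hp : 2^(k+1) = 2 * 2^k := by ring
    have hu : 2^(k+1) * a = 2 * (2^k * a) := by ring
    set L := (2^(k+1) * a) ^^^ y with hL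
    have hdiv : L / 2 = 2^k * a + y / 2 := by
      rw [hL, Nat.xor_div_two]
      have h1 : 2^(k+1) * a / 2 = 2^k * a := by
        rw [hu, Nat.mul_div_cancel_left _ (by norm_num : 0 < 2)]
      rw [h1]
      exact ih a (y / 2) (by omega)
    have hmod : L % 2 = (2^(k+1) * a + y) % 2 := by
      rw [hL, Nat.xor_mod_two_eq]
    have := Nat.div_add_mod L 2
    omega

theorem pv_xor_mask (w m : Nat) (h : m < 2^w) : m ^^^ (2^w - 1) = 2^w - 1 - m := by
  induction w generalizing m with
  | zero => interval_cases m; simp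
  | succ w ih =>
    have hp : 2^(w+1) = 2 * 2^w := by ring
    set L := m ^^^ (2^(w+1) - 1) with hL
    have hdiv : L / 2 = 2^w - 1 - m / 2 := by
      rw [hL, Nat.xor_div_two]
      have h1 : (2^(w+1) - 1) / 2 = 2^w - 1 := by omega
      rw [h1]
      exact ih (m / 2) (by omega)
    have hmod : L % 2 = (m + (2^(w+1) - 1)) % 2 := by
      rw [hL, Nat.xor_mod_two_eq]
    have := Nat.div_add_mod L 2
    have h2w : 0 < 2^w := Nat.two_pow_pos w
    omega

-- ---- representation / biasing ----
def pvRep (x : Int) : Nat := (PySem.Int.mod x 8589934592).toNat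
def pvBias (x : Int) : Nat := (x + 4294967296).toNat

theorem pvRep_emod (x : Int) : pvRep x = (x % 8589934592).toNat := by
  unfold pvRep
  rw [PySem.Int.mod_eq_emod_of_pos (by norm_num)]

theorem pvRep_lt (x : Int) : pvRep x < 2^33 := by
  rw [pvRep_emod]
  have h33 : (2:Nat)^33 = 8589934592 := by norm_num
  omega

theorem pvRep_of_nonneg {x : Int} (h0 : 0 ≤ x) (h1 : x < 8589934592) : pvRep x = x.toNat := by
  rw [pvRep_emod]; omega

theorem pvRep_of_neg {x : Int} (h0 : -8589934592 ≤ x) (h1 : x < 0) :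
    pvRep x = (-x - 1).toNat ^^^ 8589934591 := by
  have hm : (-x - 1).toNat < 2^33 := by norm_num; omega
  have := pv_xor_mask 33 (-x - 1).toNat hm
  have h33 : (2:Nat)^33 = 8589934592 := by norm_num
  rw [h33] at this
  rw [pvRep_emod, this]
  omega

theorem pv_xor_shuffle1 (x y m : Nat) : (x ^^^ y) ^^^ m = (x ^^^ m) ^^^ y := by
  apply Nat.eq_of_testBit_eq
  intro i
  simp only [Nat.testBit_xor]
  cases x.testBit i <;> cases y.testBit i <;> cases m.testBit i <;> rfl

theorem pv_xor_shuffle2 (x y m : Nat) : x ^^^ y = (x ^^^ m) ^^^ (y ^^^ m) := by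
  apply Nat.eq_of_testBit_eq
  intro i
  simp only [Nat.testBit_xor]
  cases x.testBit i <;> cases y.testBit i <;> cases m.testBit i <;> rfl

theorem pvRep_hom {a b : Int} (ha : pvInRange a) (hb : pvInRange b) :
    pvRep (PySem.Int.bxor a b) = pvRep a ^^^ pvRep b := by
  obtain ⟨ha0, ha1⟩ := ha
  obtain ⟨hb0, hb1⟩ := hb
  have h32 : (2:Nat)^32 = 4294967296 := by norm_num
  unfold PySem.Int.bxor
  split_ifs with h1 h2 h3
  · -- both nonnegative
    have hx := Nat.xor_lt_two_pow (x := a.toNat) (y := b.toNat) (n := 32)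
    rw [h32] at hx
    rw [pvRep_of_nonneg (by positivity) (by push_cast; omega),
        pvRep_of_nonneg h1 (by omega), pvRep_of_nonneg h2 (by omega)]
    simp
  · -- a ≥ 0, b < 0
    have hx := Nat.xor_lt_two_pow (x := a.toNat) (y := (-b-1).toNat) (n := 32)
    rw [h32] at hx
    rw [pvRep_of_neg (by push_cast; omega) (by push_cast; omega),
        pvRep_of_nonneg h1 (by omega), pvRep_of_neg (by omega) (by omega)]
    have he : (-(-(↑(a.toNat ^^^ (-b-1).toNat) : Int) - 1) - 1).toNat = a.toNat ^^^ (-b-1).toNat := by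
      omega
    rw [he, Nat.xor_assoc]
  · -- a < 0, b ≥ 0
    have hx := Nat.xor_lt_two_pow (x := (-a-1).toNat) (y := b.toNat) (n := 32)
    rw [h32] at hx
    rw [pvRep_of_neg (by push_cast; omega) (by push_cast; omega),
        pvRep_of_neg (by omega) (by omega), pvRep_of_nonneg h3 (by omega)]
    have he : (-(-(↑((-a-1).toNat ^^^ b.toNat) : Int) - 1) - 1).toNat = (-a-1).toNat ^^^ b.toNat := by
      omega
    rw [he, pv_xor_shuffle1]
  · -- both negative
    have hx := Nat.xor_lt_two_pow (x := (-a-1).toNat) (y := (-b-1).toNat) (n := 32)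
    rw [h32] at hx
    rw [pvRep_of_nonneg (by positivity) (by push_cast; omega),
        pvRep_of_neg (by omega) (by omega), pvRep_of_neg (by omega) (by omega)]
    have he : ((↑((-a-1).toNat ^^^ (-b-1).toNat) : Int)).toNat = (-a-1).toNat ^^^ (-b-1).toNat := by
      omega
    rw [he, ← pv_xor_shuffle2]

theorem pvRep_xor_bias {x : Int} (hx : pvInRange x) : pvRep x ^^^ 2^32 = pvBias x := by
  obtain ⟨h0, h1⟩ := hx
  have h32 : (2:Nat)^32 = 4294967296 := by norm_num
  by_cases hs : 0 ≤ x
  · -- rep x = x.toNat < 2^32; flipping bit 32 adds 2^32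
    rw [pvRep_of_nonneg hs (by omega)]
    have hh : (2^32) ^^^ x.toNat = 2^32 + x.toNat := by
      simpa using pv_two_pow_mul_xor 32 1 x.toNat (by omega)
    rw [Nat.xor_comm, hh]
    unfold pvBias
    omega
  · -- rep x = 2^32 * 1 + low, flipping bit 32 removes 2^32
    push_neg at hs
    have hrep : pvRep x = 2^32 * 1 + (x + 4294967296).toNat := by
      rw [pvRep_emod]; omega
    have hlow : (x + 4294967296).toNat < 2^32 := by omega
    rw [hrep, ← pv_two_pow_mul_xor 32 1 _ hlow]
    simp only [Nat.mul_one]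
    rw [Nat.xor_comm (2^32), Nat.xor_assoc, Nat.xor_self, Nat.xor_zero]
    unfold pvBias
    omega

theorem pvBias_le_iff {x y : Int} (hx : pvInRange x) (hy : pvInRange y) :
    pvBias x ≤ pvBias y ↔ x ≤ y := by
  obtain ⟨hx0, _⟩ := hx
  obtain ⟨hy0, _⟩ := hy
  unfold pvBias
  omega

-- ---- trie: membership, well-formedness, insert, query ----
def pvMem : Nat → Nat → PvTrie → Prop
  | 0, _, t => t ≠ PvTrie.nil
  | w+1, k, t => pvMem w k (pvChild (k.testBit w) t)

def pvWF : Nat → PvTrie → Prop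
  | 0, _ => True
  | _+1, PvTrie.nil => True
  | w+1, PvTrie.node l r =>
      (l ≠ PvTrie.nil → ∃ k, pvMem w k l) ∧ (r ≠ PvTrie.nil → ∃ k, pvMem w k r) ∧ pvWF w l ∧ pvWF w r

theorem pvMem_nil (w k : Nat) : ¬ pvMem w k PvTrie.nil := by
  induction w with
  | zero => simp [pvMem]
  | succ w ih => exact fun h => ih h

theorem pvMem_ne_nil {w k : Nat} {t : PvTrie} (h : pvMem w k t) : t ≠ PvTrie.nil := by
  rintro rfl
  exact pvMem_nil w k h

theorem pvChild_node (b : Bool) (l r : PvTrie) :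
    pvChild b (PvTrie.node l r) = if b then r else l := rfl

theorem pvChild_insert (w k : Nat) (t : PvTrie) (b : Bool) :
    pvChild b (pvInsert (w+1) k t) =
      if b = k.testBit w then pvInsert w k (pvChild b t) else pvChild b t := by
  have hun : pvInsert (w+1) k t =
      if k.testBit w then PvTrie.node (pvChild false t) (pvInsert w k (pvChild true t))
      else PvTrie.node (pvInsert w k (pvChild false t)) (pvChild true t) := rfl
  rw [hun]
  by_cases hb : k.testBit w <;> cases b <;> simp [hb, pvChild_node]

theorem pvMem_insert_self (w k : Nat) (t : PvTrie) : pvMem w k (pvInsert w k t) := by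
  induction w generalizing t with
  | zero => simp [pvMem, pvInsert]
  | succ w ih =>
    show pvMem w k (pvChild (k.testBit w) (pvInsert (w+1) k t))
    rw [pvChild_insert]
    simp only [if_pos rfl]
    exact ih _

theorem pvMem_insert_mono (w k k' : Nat) (t : PvTrie) (h : pvMem w k' t) :
    pvMem w k' (pvInsert w k t) := by
  induction w generalizing t with
  | zero => simp [pvMem, pvInsert]
  | succ w ih =>
    show pvMem w k' (pvChild (k'.testBit w) (pvInsert (w+1) k t))
    have h' : pvMem w k' (pvChild (k'.testBit w) t) := h
    rw [pvChild_insert]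
    split
    · exact ih _ h'
    · exact h'

theorem pvMem_insert_elim {w k k' : Nat} {t : PvTrie} (h : pvMem w k' (pvInsert w k t)) :
    pvMem w k' t ∨ ∀ i < w, k'.testBit i = k.testBit i := by
  induction w generalizing t with
  | zero => exact Or.inr (by omega)
  | succ w ih =>
    have h' : pvMem w k' (pvChild (k'.testBit w) (pvInsert (w+1) k t)) := h
    rw [pvChild_insert] at h'
    by_cases hsame : k'.testBit w = k.testBit w
    · rw [if_pos hsame] at h'
      rcases ih h' with hmem | hbits
      · exact Or.inl hmem
      · refine Or.inr fun i hi => ?_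
        rcases Nat.lt_succ_iff_lt_or_eq.mp hi with hi' | rfl
        · exact hbits i hi'
        · exact hsame
    · rw [if_neg hsame] at h'
      exact Or.inl h'

theorem pvMem_congr {w k k' : Nat} {t : PvTrie} (hbits : ∀ i < w, k.testBit i = k'.testBit i)
    (h : pvMem w k t) : pvMem w k' t := by
  induction w generalizing t with
  | zero => exact h
  | succ w ih =>
    show pvMem w k' (pvChild (k'.testBit w) t)
    have hw : k.testBit w = k'.testBit w := hbits w (by omega)
    have h' : pvMem w k (pvChild (k'.testBit w) t) := by rw [← hw]; exact h
    exact ih (fun i hi => hbits i (by omega)) h'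

theorem pvWF_nil (w : Nat) : pvWF w PvTrie.nil := by
  cases w <;> simp [pvWF]

theorem pvWF_insert {w : Nat} {t : PvTrie} (h : pvWF w t) (k : Nat) : pvWF w (pvInsert w k t) := by
  induction w generalizing t with
  | zero => simp [pvWF, pvInsert]
  | succ w ih =>
    have hselfmem : ∀ t', ∃ k', pvMem w k' (pvInsert w k t') :=
      fun t' => ⟨k, pvMem_insert_self w k t'⟩
    have hchildWF : ∀ b, pvWF w (pvChild b t) := by
      intro b
      cases t with
      | nil => simpa [pvChild] using pvWF_nil w
      | node l r =>
        obtain ⟨-, -, wl, wr⟩ := h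
        cases b <;> simpa [pvChild] using (by assumption)
    have hchildNE : ∀ b, pvChild b t ≠ PvTrie.nil → ∃ k', pvMem w k' (pvChild b t) := by
      intro b
      cases t with
      | nil => simp [pvChild]
      | node l r =>
        obtain ⟨hl, hr, -, -⟩ := h
        cases b <;> simp [pvChild] <;> assumption
    unfold pvInsert
    by_cases hb : k.testBit w <;> simp only [hb, if_true, if_false]
    · exact ⟨hchildNE false, fun _ => hselfmem _, hchildWF false, ih (hchildWF true)⟩
    · exact ⟨fun _ => hselfmem _, hchildNE true, ih (hchildWF false), hchildWF true⟩

theorem pv_mod_split (x w : Nat) : x % 2^(w+1) = x % 2^w + 2^w * (x / 2^w % 2) := by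
  have h : (2:Nat)^(w+1) = 2^w * 2 := by ring
  rw [h, Nat.mod_mul]

theorem pv_low_mod_eq {k k' w : Nat} (q : Nat) (h : ∀ i < w, k.testBit i = k'.testBit i) :
    (q ^^^ k) % 2^w = (q ^^^ k') % 2^w := by
  apply Nat.eq_of_testBit_eq
  intro i
  simp only [Nat.testBit_mod_two_pow, Nat.testBit_xor]
  by_cases hi : i < w
  · rw [h i hi]
  · simp [hi]

theorem pv_top_one {x w : Nat} (h : x.testBit w = true) : x / 2^w % 2 = 1 := by
  rw [Nat.testBit_eq_decide_div_mod_eq] at h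
  simpa using h

theorem pv_top_zero {x w : Nat} (h : x.testBit w = false) : x / 2^w % 2 = 0 := by
  rw [Nat.testBit_eq_decide_div_mod_eq] at h
  simp at h
  omega

theorem pvQuery_succ (w q : Nat) (t : PvTrie) :
    pvQuery (w+1) q t =
      if pvChild (!q.testBit w) t ≠ PvTrie.nil then 2^w + pvQuery w q (pvChild (!q.testBit w) t)
      else pvQuery w q (pvChild (q.testBit w) t) := rfl

theorem pvQuery_ge {w q k : Nat} {t : PvTrie} (h : pvMem w k t) :
    (q ^^^ k) % 2^w ≤ pvQuery w q t := by
  induction w generalizing t with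
  | zero => simp [pvQuery, Nat.mod_one]
  | succ w ih =>
    have h' : pvMem w k (pvChild (k.testBit w) t) := h
    have hsplit := pv_mod_split (q ^^^ k) w
    have hlow_lt : (q ^^^ k) % 2^w < 2^w := Nat.mod_lt _ (Nat.two_pow_pos w)
    by_cases hb : k.testBit w = !q.testBit w
    · have hne : pvChild (!q.testBit w) t ≠ PvTrie.nil := by
        rw [← hb]; exact pvMem_ne_nil h'
      rw [pvQuery_succ, if_pos hne]
      have hih := ih (hb ▸ h')
      have hbit : (q ^^^ k).testBit w = true := by
        rw [Nat.testBit_xor, hb]; cases q.testBit w <;> rfl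
      have htop := pv_top_one hbit
      rw [htop] at hsplit
      omega
    · have hbb : k.testBit w = q.testBit w := by
        cases hq' : q.testBit w <;> cases hk' : k.testBit w <;> simp [hq', hk'] at hb ⊢
      have hbit : (q ^^^ k).testBit w = false := by
        rw [Nat.testBit_xor, hbb]; cases q.testBit w <;> rfl
      have htop := pv_top_zero hbit
      have hih := ih (hbb ▸ h')
      rw [htop] at hsplit
      rw [pvQuery_succ]
      split_ifs with hc
      · omega
      · omega

theorem pvWF_child {w : Nat} {t : PvTrie} (h : pvWF (w+1) t) (b : Bool) : pvWF w (pvChild b t) := by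
  cases t with
  | nil => simpa [pvChild] using pvWF_nil w
  | node l r =>
    obtain ⟨-, -, wl, wr⟩ := h
    cases b <;> simpa [pvChild_node] using (by assumption)

theorem pvWF_child_mem {w : Nat} {t : PvTrie} (h : pvWF (w+1) t) (b : Bool)
    (hne : pvChild b t ≠ PvTrie.nil) : ∃ k, pvMem w k (pvChild b t) := by
  cases t with
  | nil => simp [pvChild] at hne
  | node l r =>
    obtain ⟨hl, hr, -, -⟩ := h
    cases b <;> simp only [pvChild_node, if_true, if_false, Bool.false_eq_true] at hne ⊢
    · exact hl hne
    · exact hr hne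

def pvLift (c : Bool) (k w : Nat) : Nat := k % 2^w ^^^ (if c then 2^w else 0)

theorem pvLift_testBit_top (c : Bool) (k w : Nat) : (pvLift c k w).testBit w = c := by
  unfold pvLift
  rw [Nat.testBit_xor, Nat.testBit_mod_two_pow]
  cases c <;> simp [Nat.testBit_two_pow]

theorem pvLift_testBit_low (c : Bool) (k w : Nat) {i : Nat} (hi : i < w) :
    (pvLift c k w).testBit i = k.testBit i := by
  unfold pvLift
  rw [Nat.testBit_xor, Nat.testBit_mod_two_pow]
  have : (w = i) = False := by simp; omega
  cases c <;> simp [Nat.testBit_two_pow, hi, this]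

theorem pvLift_lt (c : Bool) (k w : Nat) : pvLift c k w < 2^(w+1) := by
  have h1 : k % 2^w < 2^(w+1) := by
    have := Nat.mod_lt k (Nat.two_pow_pos w)
    have h2 : (2:Nat)^(w+1) = 2*2^w := by ring
    omega
  have h2 : (if c then 2^w else 0) < 2^(w+1) := by
    have h2' : (2:Nat)^(w+1) = 2*2^w := by ring
    have := Nat.two_pow_pos w
    cases c <;> simp <;> omega
  exact Nat.xor_lt_two_pow h1 h2

theorem pvQuery_attained {w q : Nat} {t : PvTrie} (hwf : pvWF w t) {k0 : Nat} (h0 : pvMem w k0 t) :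
    ∃ k, k < 2^w ∧ pvMem w k t ∧ pvQuery w q t = (q ^^^ k) % 2^w := by
  induction w generalizing t k0 with
  | zero =>
    refine ⟨0, by norm_num, ?_, by simp [pvQuery, Nat.mod_one]⟩
    exact h0
  | succ w ih =>
    by_cases hc : pvChild (!q.testBit w) t ≠ PvTrie.nil
    · obtain ⟨k1, hk1⟩ := pvWF_child_mem hwf (!q.testBit w) hc
      obtain ⟨k, -, hk, hQ⟩ := ih (pvWF_child hwf (!q.testBit w)) hk1
      refine ⟨pvLift (!q.testBit w) k w, pvLift_lt _ k w, ?_, ?_⟩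
      · show pvMem w _ (pvChild ((pvLift (!q.testBit w) k w).testBit w) t)
        rw [pvLift_testBit_top]
        exact pvMem_congr (fun i hi => (pvLift_testBit_low _ k w hi).symm) hk
      · rw [pvQuery_succ, if_pos hc, hQ]
        have hbit : (q ^^^ pvLift (!q.testBit w) k w).testBit w = true := by
          rw [Nat.testBit_xor, pvLift_testBit_top]; cases q.testBit w <;> rfl
        have htop := pv_top_one hbit
        have hlow : (q ^^^ pvLift (!q.testBit w) k w) % 2^w = (q ^^^ k) % 2^w :=
          pv_low_mod_eq q (fun i hi => pvLift_testBit_low _ k w hi)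
        have hsplit := pv_mod_split (q ^^^ pvLift (!q.testBit w) k w) w
        rw [htop] at hsplit
        omega
    · push_neg at hc
      have h0' : pvMem w k0 (pvChild (q.testBit w) t) := by
        have hb0 : k0.testBit w = q.testBit w := by
          by_contra hne
          have : k0.testBit w = !q.testBit w := by
            cases hq' : q.testBit w <;> cases hk' : k0.testBit w <;> simp [hq', hk'] at hne ⊢
          have hx : pvMem w k0 (pvChild (k0.testBit w) t) := h0
          rw [this, hc] at hx
          exact pvMem_nil w k0 hx
        have hx : pvMem w k0 (pvChild (k0.testBit w) t) := h0
        rwa [hb0] at hx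
      obtain ⟨k, -, hk, hQ⟩ := ih (pvWF_child hwf (q.testBit w)) h0'
      refine ⟨pvLift (q.testBit w) k w, pvLift_lt _ k w, ?_, ?_⟩
      · show pvMem w _ (pvChild ((pvLift (q.testBit w) k w).testBit w) t)
        rw [pvLift_testBit_top]
        exact pvMem_congr (fun i hi => (pvLift_testBit_low _ k w hi).symm) hk
      · rw [pvQuery_succ, if_neg (by simpa using hc), hQ]
        have hbit : (q ^^^ pvLift (q.testBit w) k w).testBit w = false := by
          rw [Nat.testBit_xor, pvLift_testBit_top]; cases q.testBit w <;> rfl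
        have htop := pv_top_zero hbit
        have hlow : (q ^^^ pvLift (q.testBit w) k w) % 2^w = (q ^^^ k) % 2^w :=
          pv_low_mod_eq q (fun i hi => pvLift_testBit_low _ k w hi)
        have hsplit := pv_mod_split (q ^^^ pvLift (q.testBit w) k w) w
        rw [htop] at hsplit
        omega

-- ---- pvMaxO machinery ----
theorem pvMaxO_append (a : Option Int) (l₁ l₂ : List Int) :
    pvMaxO a (l₁ ++ l₂) = pvMaxO (pvMaxO a l₁) l₂ := by
  unfold pvMaxO
  rw [List.foldl_append]

theorem pvMaxO_some (a : Int) (l : List Int) : pvMaxO (some a) l = some (l.foldl max a) := by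
  induction l generalizing a with
  | nil => rfl
  | cons x xs ih => exact ih (max a x)

theorem pvMaxO_spec (l : List Int) (hl : l ≠ []) :
    ∃ m, pvMaxO none l = some m ∧ m ∈ l ∧ ∀ x ∈ l, x ≤ m := by
  obtain ⟨x, t, rfl⟩ := List.exists_cons_of_ne_nil hl
  have h1 : pvMaxO none (x :: t) = pvMaxO (some x) t := rfl
  rw [h1, pvMaxO_some]
  refine ⟨t.foldl max x, rfl, ?_, ?_⟩
  · rcases PySem.List.foldl_max_mem t x with h | h
    · rw [h]; exact List.mem_cons_self
    · exact List.mem_cons_of_mem _ h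
  · intro y hy
    rcases List.mem_cons.mp hy with rfl | hy
    · exact (PySem.List.le_foldl_max t y).1
    · exact (PySem.List.le_foldl_max t x).2 y hy


-- ---- the A side: A computes the maximum of an explicit candidate list ----
def pvStepInner (st : Int × Option Int) (x : Int) : Int × Option Int :=
  let c := PySem.Int.bxor st.1 x
  (c, some (match st.2 with | none => c | some a => max a c))

def pvScan : Int → List Int → List Int
  | _, [] => []
  | c, x :: xs => PySem.Int.bxor c x :: pvScan (PySem.Int.bxor c x) xs

def pvFlat (arr : List Int) : List Int :=
  (List.range arr.length).flatMap (fun k => pvScan 0 (arr.drop k))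

theorem pvScan_foldl (ys : List Int) (c : Int) (a : Option Int) :
    ys.foldl pvStepInner (c, a) = (ys.foldl PySem.Int.bxor c, pvMaxO a (pvScan c ys)) := by
  induction ys generalizing c a with
  | nil => rfl
  | cons x xs ih =>
    show xs.foldl pvStepInner (pvStepInner (c, a) x) = _
    rw [show pvStepInner (c, a) x
        = (PySem.Int.bxor c x,
           some (match a with | none => PySem.Int.bxor c x | some m => max m (PySem.Int.bxor c x)))
        from rfl, ih]
    rfl

theorem pvMaxO_flat {γ : Type} (l : List γ) (g : γ → List Int) (a : Option Int) :
    l.foldl (fun a k => pvMaxO a (g k)) a = pvMaxO a (l.flatMap g) := by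
  induction l generalizing a with
  | nil => rfl
  | cons x xs ih => rw [List.foldl_cons, ih, List.flatMap_cons, pvMaxO_append]

theorem A_as_flat (arr : List Int) :
    MaxSubarrayXOR arr = (pvMaxO none (pvFlat arr)).getD 0 := by
  show ((PySem.List.pyRange 0 (PySem.List.len arr) 1).foldl
      (fun ans i => ((PySem.List.pyRange i (PySem.List.len arr) 1).foldl
        (fun st j => pvStepInner st (PySem.List.pyGetD arr j 0)) (0, ans)).2) none).getD 0 = _
  rw [PySem.List.foldl_congr_mem _ _
      (fun ans i => pvMaxO ans (pvScan 0 (arr.drop i.toNat))) none ?_]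
  · rw [PySem.List.len_eq, PySem.List.pyRange_zero_nat, List.foldl_map]
    simp only [Int.toNat_natCast]
    rw [pvMaxO_flat]
    rfl
  · intro acc i hi
    have h0 : 0 ≤ i := (PySem.List.mem_pyRange_one.mp hi).1
    rw [PySem.List.foldl_pyRange_pyGetD arr 0 pvStepInner (0, acc) h0, pvScan_foldl]

theorem pvX_singleton' (x : Int) : pvX [x] = x := by
  rw [pvX_cons, show pvX [] = 0 from rfl, PySem.Int.bxor_zero]

theorem pvScan_mem (ys : List Int) (c v : Int) :
    v ∈ pvScan c ys ↔ ∃ j < ys.length, v = PySem.Int.bxor c (pvX (ys.take (j+1))) := by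
  induction ys generalizing c with
  | nil => simp [pvScan]
  | cons x xs ih =>
    simp only [pvScan, List.mem_cons, ih (PySem.Int.bxor c x)]
    constructor
    · rintro (rfl | ⟨j, hj, rfl⟩)
      · refine ⟨0, by simp, ?_⟩
        simp [List.take_succ_cons, pvX_singleton']
      · refine ⟨j+1, by simpa using hj, ?_⟩
        rw [List.take_succ_cons, pvX_cons, pv_bxor_assoc]
    · rintro ⟨j, hj, rfl⟩
      cases j with
      | zero =>
        left
        simp [List.take_succ_cons, pvX_singleton']
      | succ j =>
        right
        refine ⟨j, by simpa using hj, ?_⟩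
        rw [List.take_succ_cons, pvX_cons, pv_bxor_assoc]

theorem pvFlat_mem (arr : List Int) (v : Int) : v ∈ pvFlat arr ↔ pvCand arr v := by
  unfold pvFlat
  rw [List.mem_flatMap]
  constructor
  · rintro ⟨k, hk, hv⟩
    rw [List.mem_range] at hk
    rw [pvScan_mem] at hv
    obtain ⟨j, hj, rfl⟩ := hv
    rw [List.length_drop] at hj
    have htake : arr.take (k + (j+1)) = arr.take k ++ (arr.drop k).take (j+1) := List.take_add
    have hX : pvX (arr.take (k + (j+1)))
        = PySem.Int.bxor (pvX (arr.take k)) (pvX ((arr.drop k).take (j+1))) := by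
      rw [htake, pvX_append]
    refine ⟨k + (j+1), k, by omega, by omega, ?_⟩
    rw [pv_zero_bxor,
        show pvX ((arr.drop k).take (j+1))
          = PySem.Int.bxor (pvX (arr.take k)) (pvX (arr.take (k + (j+1)))) from by
            rw [hX, pv_bxor_cancel],
        PySem.Int.bxor_comm]
  · rintro ⟨i, j, hji, hin, rfl⟩
    refine ⟨j, List.mem_range.mpr (by omega), ?_⟩
    rw [pvScan_mem]
    refine ⟨i - j - 1, by rw [List.length_drop]; omega, ?_⟩
    rw [pv_zero_bxor]
    have htake : arr.take (j + (i - j - 1 + 1)) = arr.take j ++ (arr.drop j).take (i - j - 1 + 1) :=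
      List.take_add
    have hij : j + (i - j - 1 + 1) = i := by omega
    rw [hij] at htake
    have hX : pvX (arr.take i)
        = PySem.Int.bxor (pvX (arr.take j)) (pvX ((arr.drop j).take (i - j - 1 + 1))) := by
      rw [htake, pvX_append]
    rw [show pvX ((arr.drop j).take (i - j - 1 + 1))
        = PySem.Int.bxor (pvX (arr.take j)) (pvX (arr.take i)) from by rw [hX, pv_bxor_cancel],
        PySem.Int.bxor_comm]

theorem A_char (arr : List Int) (h : arr ≠ []) :
    ∃ m, MaxSubarrayXOR arr = m ∧ pvIsMax arr m := by
  have hne : pvFlat arr ≠ [] := by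
    apply List.ne_nil_of_mem (a := PySem.Int.bxor (pvX (arr.take 1)) (pvX (arr.take 0)))
    rw [pvFlat_mem]
    exact ⟨1, 0, by omega, by cases arr with | nil => exact absurd rfl h | cons a l => simp, rfl⟩
  obtain ⟨m, hopt, hmem, hmax⟩ := pvMaxO_spec (pvFlat arr) hne
  refine ⟨m, by rw [A_as_flat, hopt]; rfl, (pvFlat_mem arr m).mp hmem, ?_⟩
  intro v hv
  exact hmax v ((pvFlat_mem arr v).mpr hv)

-- ---- the B side: the trie loop maintains the same maximum ----
def pvStepB (st : PvTrie × Int × Option Int) (x : Int) : PvTrie × Int × Option Int :=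
  let pref := PySem.Int.bxor st.2.1 x
  let rep : Nat := (PySem.Int.mod pref 8589934592).toNat
  let r := pvQuery 33 (rep ^^^ 4294967296) st.1
  let u := r ^^^ 4294967296
  let v : Int := if u < 4294967296 then (u : Int) else (u : Int) - 8589934592
  let ans : Option Int := some (match st.2.2 with | none => v | some a => max a v)
  (pvInsert 33 rep st.1, pref, ans)

theorem B_unfold (arr : List Int) :
    MaxSubarrayXOR_alt arr
      = ((arr.foldl pvStepB (pvInsert 33 0 PvTrie.nil, 0, none)).2.2).getD 0 := rfl

def pvInv (pre : List Int) (st : PvTrie × Int × Option Int) : Prop :=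
  st.2.1 = pvX pre ∧ pvWF 33 st.1 ∧
  (∀ s, s < 2^33 → (pvMem 33 s st.1 ↔ ∃ k ≤ pre.length, s = pvRep (pvX (pre.take k)))) ∧
  ((pre = [] ∧ st.2.2 = none) ∨ (∃ m, st.2.2 = some m ∧ pvIsMax pre m))

theorem pv_eq_of_low_bits {a b w : Nat} (ha : a < 2^w) (hb : b < 2^w)
    (h : ∀ i < w, a.testBit i = b.testBit i) : a = b := by
  apply Nat.eq_of_testBit_eq
  intro i
  by_cases hi : i < w
  · exact h i hi
  · have hw : (2:Nat)^w ≤ 2^i := Nat.pow_le_pow_right (by norm_num) (by omega)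
    rw [Nat.testBit_lt_two_pow (by omega), Nat.testBit_lt_two_pow (by omega)]

theorem pv_xor_invol (x m : Nat) : (x ^^^ m) ^^^ m = x := by
  rw [Nat.xor_assoc, Nat.xor_self, Nat.xor_zero]

theorem pvRep_zero : pvRep 0 = 0 := by rw [pvRep_emod]; rfl

theorem B_init : pvInv [] (pvInsert 33 0 PvTrie.nil, 0, none) := by
  refine ⟨rfl, pvWF_insert (pvWF_nil 33) 0, ?_, Or.inl ⟨rfl, rfl⟩⟩
  intro s hs
  constructor
  · intro hm
    replace hm : pvMem 33 s (pvInsert 33 0 PvTrie.nil) := hm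
    rcases pvMem_insert_elim hm with h | hbits
    · exact absurd h (pvMem_nil 33 s)
    · refine ⟨0, by simp, ?_⟩
      show s = pvRep (pvX [])
      rw [show pvX [] = 0 from rfl, pvRep_zero]
      exact pv_eq_of_low_bits hs (by norm_num) (by simpa using hbits)
  · rintro ⟨k, hk, rfl⟩
    have hk0 : k = 0 := by simpa using hk
    subst hk0
    show pvMem 33 (pvRep (pvX [])) (pvInsert 33 0 PvTrie.nil)
    rw [show pvX [] = 0 from rfl, pvRep_zero]
    exact pvMem_insert_self 33 0 PvTrie.nil

theorem pvCand_nil (v : Int) : ¬ pvCand [] v := by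
  rintro ⟨i, j, hji, hin, -⟩
  simp at hin
  omega

theorem pvCand_append (pre : List Int) (x v : Int) :
    pvCand (pre ++ [x]) v ↔
      pvCand pre v ∨ ∃ j ≤ pre.length, v = PySem.Int.bxor (pvX (pre ++ [x])) (pvX (pre.take j)) := by
  constructor
  · rintro ⟨i, j, hji, hin, rfl⟩
    rw [List.length_append, List.length_cons, List.length_nil] at hin
    by_cases hi : i ≤ pre.length
    · left
      refine ⟨i, j, hji, hi, ?_⟩
      rw [List.take_append_of_le_length hi, List.take_append_of_le_length (by omega)]
    · right
      have hie : i = pre.length + 1 := by omega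
      refine ⟨j, by omega, ?_⟩
      rw [hie, show pre.length + 1 = (pre ++ [x]).length by simp, List.take_length,
          List.take_append_of_le_length (by omega)]
  · rintro (⟨i, j, hji, hin, rfl⟩ | ⟨j, hj, rfl⟩)
    · refine ⟨i, j, hji, by simp; omega, ?_⟩
      rw [List.take_append_of_le_length hin, List.take_append_of_le_length (by omega)]
    · refine ⟨pre.length + 1, j, by omega, by simp, ?_⟩
      rw [show pre.length + 1 = (pre ++ [x]).length by simp, List.take_length,
          List.take_append_of_le_length hj]

theorem B_step (pre : List Int) (x : Int) (hx : pvInRange x) (hpre : ∀ y ∈ pre, pvInRange y)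
    (st : PvTrie × Int × Option Int) (h : pvInv pre st) : pvInv (pre ++ [x]) (pvStepB st x) := by
  obtain ⟨hp, hwf, hmem, hans⟩ := h
  have hprex : ∀ y ∈ pre ++ [x], pvInRange y := by
    intro y hy
    rcases List.mem_append.mp hy with hy | hy
    · exact hpre y hy
    · simp at hy; subst hy; exact hx
  have hPrange : ∀ (l : List Int), (∀ y ∈ l, pvInRange y) → ∀ k, pvInRange (pvX (l.take k)) :=
    fun l hl k => pvX_range (fun y hy => hl y (List.mem_of_mem_take hy))
  have hp' : PySem.Int.bxor st.2.1 x = pvX (pre ++ [x]) := by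
    rw [hp, pvX_append, pvX_singleton']
  set p' := PySem.Int.bxor st.2.1 x with hp'def
  have hp'range : pvInRange p' := by
    rw [hp']
    exact pvX_range hprex
  have e32 : (4294967296 : Nat) = 2^32 := by norm_num
  have e33 : (8589934592 : Nat) = 2^33 := by norm_num
  have hPj : ∀ j, j ≤ pre.length → pvInRange (pvX (pre.take j)) :=
    fun j _ => hPrange pre hpre j
  have hbprange : ∀ j, j ≤ pre.length → pvInRange (PySem.Int.bxor p' (pvX (pre.take j))) :=
    fun j hj => pv_bxor_range hp'range (hPj j hj)
  have hmem0 : pvMem 33 (pvRep (pvX (pre.take 0))) st.1 :=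
    (hmem _ (pvRep_lt _)).mpr ⟨0, by omega, rfl⟩
  obtain ⟨kstar, hklt, hkmem, hQ⟩ := pvQuery_attained (q := pvRep p' ^^^ 4294967296) hwf hmem0
  obtain ⟨k0, hk0le, hk0eq⟩ := (hmem kstar hklt).mp hkmem
  have hval : ∀ j, j ≤ pre.length →
      (pvRep p' ^^^ 4294967296) ^^^ pvRep (pvX (pre.take j))
        = pvBias (PySem.Int.bxor p' (pvX (pre.take j))) := by
    intro j hj
    rw [e32, ← pv_xor_shuffle1, ← pvRep_hom hp'range (hPj j hj), pvRep_xor_bias (hbprange j hj)]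
  have hbias_lt : ∀ z : Int, pvInRange z → pvBias z < 2^33 := by
    intro z hz
    obtain ⟨h1, h2⟩ := hz
    have h33 : (2:Nat)^33 = 8589934592 := by norm_num
    unfold pvBias
    omega
  have hr : pvQuery 33 (pvRep p' ^^^ 4294967296) st.1
      = pvBias (PySem.Int.bxor p' (pvX (pre.take k0))) := by
    rw [hQ, hk0eq, hval k0 hk0le, Nat.mod_eq_of_lt (hbias_lt _ (hbprange k0 hk0le))]
  have hub : ∀ j, j ≤ pre.length →
      PySem.Int.bxor p' (pvX (pre.take j)) ≤ PySem.Int.bxor p' (pvX (pre.take k0)) := by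
    intro j hj
    have hmj : pvMem 33 (pvRep (pvX (pre.take j))) st.1 := (hmem _ (pvRep_lt _)).mpr ⟨j, hj, rfl⟩
    have hge := pvQuery_ge (q := pvRep p' ^^^ 4294967296) hmj
    rw [hval j hj, Nat.mod_eq_of_lt (hbias_lt _ (hbprange j hj)), hr] at hge
    exact (pvBias_le_iff (hbprange j hj) (hbprange k0 hk0le)).mp hge
  have hu : pvQuery 33 (pvRep p' ^^^ 4294967296) st.1 ^^^ 4294967296
      = pvRep (PySem.Int.bxor p' (pvX (pre.take k0))) := by
    rw [hr, e32, ← pvRep_xor_bias (hbprange k0 hk0le), pv_xor_invol]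
  have hv : (if pvQuery 33 (pvRep p' ^^^ 4294967296) st.1 ^^^ 4294967296 < 4294967296
        then ((pvQuery 33 (pvRep p' ^^^ 4294967296) st.1 ^^^ 4294967296 : Nat) : Int)
        else ((pvQuery 33 (pvRep p' ^^^ 4294967296) st.1 ^^^ 4294967296 : Nat) : Int) - 8589934592)
      = PySem.Int.bxor p' (pvX (pre.take k0)) := by
    obtain ⟨hb1, hb2⟩ := hbprange k0 hk0le
    rw [hu, pvRep_emod]
    split_ifs with hcond
    · omega
    · omega
  refine ⟨hp', pvWF_insert hwf _, ?_, ?_⟩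
  · -- trie membership characterisation
    intro s hs
    constructor
    · intro hm
      replace hm : pvMem 33 s (pvInsert 33 (pvRep p') st.1) := hm
      rcases pvMem_insert_elim hm with hold | hbits
      · obtain ⟨k, hk, hkeq⟩ := (hmem s hs).mp hold
        refine ⟨k, by simp; omega, ?_⟩
        rw [List.take_append_of_le_length hk]
        exact hkeq
      · refine ⟨pre.length + 1, by simp, ?_⟩
        rw [show pre.length + 1 = (pre ++ [x]).length by simp, List.take_length, ← hp']
        exact pv_eq_of_low_bits hs (pvRep_lt _) hbits
    · rintro ⟨k, hk, rfl⟩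
      by_cases hkle : k ≤ pre.length
      · rw [List.take_append_of_le_length hkle]
        exact pvMem_insert_mono 33 _ _ _ ((hmem _ (pvRep_lt _)).mpr ⟨k, hkle, rfl⟩)
      · have hkeq : k = pre.length + 1 := by simp at hk; omega
        subst hkeq
        rw [show pre.length + 1 = (pre ++ [x]).length by simp, List.take_length, ← hp']
        exact pvMem_insert_self 33 (pvRep p') st.1
  · -- the running maximum
    have hstep22 : (pvStepB st x).2.2
        = some (match st.2.2 with
          | none => (if pvQuery 33 (pvRep p' ^^^ 4294967296) st.1 ^^^ 4294967296 < 4294967296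
              then ((pvQuery 33 (pvRep p' ^^^ 4294967296) st.1 ^^^ 4294967296 : Nat) : Int)
              else ((pvQuery 33 (pvRep p' ^^^ 4294967296) st.1 ^^^ 4294967296 : Nat) : Int)
                - 8589934592)
          | some a => max a (if pvQuery 33 (pvRep p' ^^^ 4294967296) st.1 ^^^ 4294967296 < 4294967296
              then ((pvQuery 33 (pvRep p' ^^^ 4294967296) st.1 ^^^ 4294967296 : Nat) : Int)
              else ((pvQuery 33 (pvRep p' ^^^ 4294967296) st.1 ^^^ 4294967296 : Nat) : Int)
                - 8589934592)) := rfl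
    rcases hans with ⟨hpre0, hnone⟩ | ⟨m, hsome, hcand, hmax⟩
    · subst hpre0
      have hk00 : k0 = 0 := by simpa using hk0le
      subst hk00
      have h22 : (pvStepB st x).2.2 = some (PySem.Int.bxor p' (pvX (([] : List Int).take 0))) := by
        rw [hstep22, hnone, hv]
      refine Or.inr ⟨_, h22, ?_, ?_⟩
      · rw [pvCand_append]
        exact Or.inr ⟨0, by simp, by rw [← hp']⟩
      · intro v' hv'
        rcases (pvCand_append [] x v').mp hv' with hc | ⟨j, hj, rfl⟩
        · exact absurd hc (pvCand_nil v')
        · have hj0 : j = 0 := by simpa using hj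
          subst hj0
          rw [← hp']
    · have h22 : (pvStepB st x).2.2 = some (max m (PySem.Int.bxor p' (pvX (pre.take k0)))) := by
        rw [hstep22, hsome, hv]
      refine Or.inr ⟨_, h22, ?_, ?_⟩
      · rcases max_choice m (PySem.Int.bxor p' (pvX (pre.take k0))) with hmx | hmx <;>
          rw [hmx, pvCand_append]
        · exact Or.inl hcand
        · exact Or.inr ⟨k0, hk0le, by rw [← hp']⟩
      · intro v' hv'
        rcases (pvCand_append pre x v').mp hv' with hc | ⟨j, hj, rfl⟩
        · exact le_trans (hmax v' hc) (le_max_left _ _)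
        · rw [← hp']
          exact le_trans (hub j hj) (le_max_right _ _)

theorem B_fold (rest : List Int) : ∀ (pre : List Int) (st : PvTrie × Int × Option Int),
    (∀ y ∈ pre ++ rest, pvInRange y) → pvInv pre st → pvInv (pre ++ rest) (rest.foldl pvStepB st) := by
  induction rest with
  | nil => intro pre st h hinv; simpa using hinv
  | cons x rest ih =>
    intro pre st hall hinv
    have hstep := B_step pre x (hall x (by simp)) (fun y hy => hall y (by simp [hy])) st hinv
    have := ih (pre ++ [x]) (pvStepB st x)
      (by intro y hy; apply hall; simpa [List.append_assoc] using hy) hstep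
    simpa [List.append_assoc] using this

theorem B_char (arr : List Int) (hr : ∀ y ∈ arr, pvInRange y) (h : arr ≠ []) :
    ∃ m, MaxSubarrayXOR_alt arr = m ∧ pvIsMax arr m := by
  have hinv := B_fold arr [] (pvInsert 33 0 PvTrie.nil, 0, none) (by simpa using hr) B_init
  rw [List.nil_append] at hinv
  obtain ⟨-, -, -, hans⟩ := hinv
  rcases hans with ⟨h0, -⟩ | ⟨m, hm, hism⟩
  · exact absurd h0 h
  · exact ⟨m, by rw [B_unfold, hm]; rfl, hism⟩

-- ===== VERDICT (by name: the statement is the Claim_ definition above) =====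
theorem MaxSubarrayXOR_spec : Claim_equal_MaxSubarrayXOR := by
  intro arr hdom hpre
  unfold Spec_MaxSubarrayXOR
  have hr : ∀ y ∈ arr, pvInRange y := by
    intro y hy
    have hb := (List.all_eq_true.mp hdom) y hy
    simp only [pvDomInt, decide_eq_true_eq] at hb
    unfold pvInRange
    omega
  obtain ⟨mA, hA, hAc, hAm⟩ := A_char arr hpre
  obtain ⟨mB, hB, hBc, hBm⟩ := B_char arr hr hpre
  rw [hA, hB, le_antisymm (hBm mA hAc) (hAm mB hBc)]
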